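-- pv_equiv track=rewrite | github.com/evenwebb/calendar-scraper-template | utils.py | escape_and_fold_ical_text
-- ===== SOURCE A (Python) =====
-- def sanitize_ical_text(text: str) -> str:
--     """Sanitize text for iCalendar format (RFC 5545).
--
--     Escapes special characters and handles line length.
--
--     Args:
--         text: Text to sanitize
--
--     Returns:
--         Sanitized text safe for iCalendar
--     """
--     if not text:
--         return ""
--
--     # Escape special characters
--     text = text.replace("\\", "\\\\")
--     text = text.replace("\n", "\\n")
--     text = text.replace(",", "\\,")
--     text = text.replace(";", "\\;")
--
--     return text
--
-- def escape_and_fold_ical_text(text: str, prefix: str = "", line_length: int = 75) -> str: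
--     """Escape and fold text for iCalendar format per RFC 5545.
--
--     Args:
--         text: Text to escape and fold
--         prefix: Prefix for the line (e.g., "DESCRIPTION:")
--         line_length: Maximum line length (default 75 per RFC 5545)
--
--     Returns:
--         Escaped and folded text with line breaks
--     """
--     escaped = sanitize_ical_text(text)
--     full_line = prefix + escaped
--
--     if len(full_line) <= line_length:
--         return full_line
--
--     result = [full_line[:line_length]]
--     remaining = full_line[line_length:]
--     while remaining:
--         result.append(" " + remaining[: line_length - 1])
--         remaining = remaining[line_length - 1 :]
--     return "\n".join(result)
-- ===== SOURCE B (Python) =====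
-- def escape_and_fold_ical_text(text: str, prefix: str = "", line_length: int = 75) -> str:
--     mapping = {"\\": "\\\\", "\n": "\\n", ",": "\\,", ";": "\\;"}
--     full_line = prefix + "".join(mapping.get(c, c) for c in text)
--     if len(full_line) <= line_length:
--         return full_line
--     parts = [full_line[:line_length]]
--     parts.extend(" " + full_line[i:i + line_length - 1]
--                  for i in range(line_length, len(full_line), line_length - 1))
--     return "\n".join(parts)
-- ===== Notes on version B (the rewrite author's own statement) =====
-- stated objective: alternative
-- what changed: Escaping is one table-driven pass over the characters (a translation dict + join) instead of four sequential whole-string .replace scans, and the folding while-loop that repeatedly re-slices `remaining` is replaced by a comprehension over range(line_length, len(full_line), line_length-1) slicing directly into full_line.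
-- outside the precondition, e.g. on escape_and_fold_ical_text('abcdef', '', 0): A does not finish within the time limit, B returns ''
import Mathlib
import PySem

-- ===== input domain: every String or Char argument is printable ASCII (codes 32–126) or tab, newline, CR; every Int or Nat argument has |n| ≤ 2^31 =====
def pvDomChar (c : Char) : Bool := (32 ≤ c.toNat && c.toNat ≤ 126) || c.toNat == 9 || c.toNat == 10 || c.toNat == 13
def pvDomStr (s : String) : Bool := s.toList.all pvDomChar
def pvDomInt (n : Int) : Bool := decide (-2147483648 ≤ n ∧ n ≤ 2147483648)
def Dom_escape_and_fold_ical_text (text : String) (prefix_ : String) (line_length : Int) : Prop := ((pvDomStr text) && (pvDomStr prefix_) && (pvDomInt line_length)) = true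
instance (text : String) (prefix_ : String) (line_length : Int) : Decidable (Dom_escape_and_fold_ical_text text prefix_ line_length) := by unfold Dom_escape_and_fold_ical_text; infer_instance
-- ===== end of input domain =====

-- B replaces A's four sequential whole-string .replace passes by one table-driven pass over the
-- characters, and A's while-loop that repeatedly re-slices `remaining` by a range-driven
-- comprehension over the fold start positions; equal return values are proved below.

-- ===== PORT A =====

-- sanitize_ical_text: four sequential replaces
def pvSanA (text : List Char) : List Char :=
  if text = [] then []
  else
    PySem.Chars.replace
      (PySem.Chars.replace
        (PySem.Chars.replace
          (PySem.Chars.replace text ['\\'] ['\\', '\\'])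
          ['\n'] ['\\', 'n'])
        [','] ['\\', ','])
      [';'] ['\\', ';']

-- the `while remaining:` loop; fuel makes it total (A itself diverges when line_length < 2
-- and the loop is reached — those inputs are excluded by Pre_ below)
def pvLoopA (ll : Int) : Nat → List Char → List (List Char) → List (List Char)
  | 0, _, result => result
  | fuel + 1, remaining, result =>
    if remaining = [] then result
    else pvLoopA ll fuel (PySem.List.slice remaining (some (ll - 1)) none)
          (result ++ [' ' :: PySem.List.slice remaining none (some (ll - 1))])

def escape_and_fold_ical_text (text : String) (prefix_ : String) (line_length : Int) : String :=
  let escaped := pvSanA text.toList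
  let full_line := prefix_.toList ++ escaped
  if (full_line.length : Int) ≤ line_length then String.ofList full_line
  else
    let result := [PySem.List.slice full_line none (some line_length)]
    let remaining := PySem.List.slice full_line (some line_length) none
    String.ofList (PySem.Chars.join ['\n'] (pvLoopA line_length remaining.length remaining result))

-- ===== PORT B =====

-- the translation dict built once
def pvMappingB : PySem.Dict Char String :=
  PySem.Dict.ofList [('\\', "\\\\"), ('\n', "\\n"), (',', "\\,"), (';', "\\;")]

def escape_and_fold_ical_text_alt (text : String) (prefix_ : String) (line_length : Int) : String :=
  let full_line := prefix_.toList ++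
    PySem.Chars.join [] (text.toList.map (fun c => (PySem.Dict.getD pvMappingB c (String.ofList [c])).toList))
  if (full_line.length : Int) ≤ line_length then String.ofList full_line
  else
    let parts := PySem.List.slice full_line none (some line_length) ::
      (PySem.List.pyRange line_length (full_line.length : Int) (line_length - 1)).map
        (fun i => ' ' :: PySem.List.slice full_line (some i) (some (i + (line_length - 1))))
    String.ofList (PySem.Chars.join ['\n'] parts)

-- ===== PRECONDITION & SPEC =====

-- Pre_ excludes exactly the inputs on which A never returns: when line_length < 2 and the
-- escaped full line is longer than line_length, A's `while remaining:` loop never shrinks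
-- `remaining` and diverges, so there is no return value to match.
def Pre_escape_and_fold_ical_text (text : String) (prefix_ : String) (line_length : Int) : Prop :=
  2 ≤ line_length ∨
    ((prefix_.toList.length : Int) + text.toList.length +
      (text.toList.countP (fun c => c == '\\' || c == '\n' || c == ',' || c == ';')) ≤ line_length)

instance (text : String) (prefix_ : String) (line_length : Int) : Decidable (Pre_escape_and_fold_ical_text text prefix_ line_length) := by
  unfold Pre_escape_and_fold_ical_text; infer_instance

def pvWitness_escape_and_fold_ical_text : String × String × Int := ("a,b;c\nd", "DESCRIPTION:", 8)

def Spec_escape_and_fold_ical_text (text : String) (prefix_ : String) (line_length : Int) (out : String) : Prop := out = escape_and_fold_ical_text_alt text prefix_ line_length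
instance (text : String) (prefix_ : String) (line_length : Int) (out : String) : Decidable (Spec_escape_and_fold_ical_text text prefix_ line_length out) := by unfold Spec_escape_and_fold_ical_text; infer_instance

-- ===== CLAIM (what is proved, stated in full; the proofs are below) =====
def Claim_equal_escape_and_fold_ical_text : Prop := ∀ (text : String) (prefix_ : String) (line_length : Int), Dom_escape_and_fold_ical_text text prefix_ line_length → Pre_escape_and_fold_ical_text text prefix_ line_length → Spec_escape_and_fold_ical_text text prefix_ line_length (escape_and_fold_ical_text text prefix_ line_length)

-- ===== LEMMAS AND PROOFS =====

-- per-character escape table: the common denominator of A's replace chain and B's dict pass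
def pvG (c : Char) : List Char :=
  if c = '\\' then ['\\', '\\']
  else if c = '\n' then ['\\', 'n']
  else if c = ',' then ['\\', ',']
  else if c = ';' then ['\\', ';']
  else [c]

theorem pvReplaceGo_single (c : Char) (new : List Char) :
    ∀ (fuel : Nat) (l acc : List Char), l.length ≤ fuel →
      PySem.Chars.replace.go [c] new fuel l acc =
        acc.reverse ++ l.flatMap (fun x => if x = c then new else [x]) := by
  intro fuel
  induction fuel with
  | zero => intro l acc h; simp at h; subst h; simp [PySem.Chars.replace.go]
  | succ n ih =>
    intro l acc h
    cases l with
    | nil => simp [PySem.Chars.replace.go]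
    | cons x t =>
      rw [PySem.Chars.replace.go]
      by_cases hx : x = c
      · subst hx
        have hp : List.isPrefixOf [x] (x :: t) = true := by simp [List.isPrefixOf]
        rw [if_pos hp]
        rw [ih _ _ (by simpa using Nat.lt_succ_iff.mp (Nat.lt_of_lt_of_le (by simp) h))]
        simp
      · have hp : List.isPrefixOf [c] (x :: t) = false := by
          simp [List.isPrefixOf]; exact fun hh => (hx hh.symm).elim
        rw [if_neg (by simp [hp])]
        rw [ih t (x :: acc) (by simp at h; omega)]
        simp [hx]

-- replacing a single-character pattern is a per-character flatMap
theorem pvReplace_single (c : Char) (new : List Char) (l : List Char) :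
    PySem.Chars.replace l [c] new = l.flatMap (fun x => if x = c then new else [x]) := by
  rw [PySem.Chars.replace]
  rw [if_neg (by simp)]
  rw [pvReplaceGo_single c new l.length l [] le_rfl]
  simp

theorem pvJoin_empty (xs : List (List Char)) : PySem.Chars.join [] xs = xs.flatten := by
  induction xs with
  | nil => simp [PySem.Chars.join_nil]
  | cons h t ih =>
    cases t with
    | nil => simp [PySem.Chars.join_singleton]
    | cons b t2 => rw [PySem.Chars.join_cons_cons, List.flatten_cons]; simpa using ih

-- composing the four single-character replacements acts on each character as pvG
theorem pvChain (x : Char) :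
    List.flatMap
      (fun y =>
        List.flatMap
          (fun z => List.flatMap (fun w => if w = ';' then ['\\', ';'] else [w]) (if z = ',' then ['\\', ','] else [z]))
          (if y = '\n' then ['\\', 'n'] else [y]))
      (if x = '\\' then ['\\', '\\'] else [x]) = pvG x := by
  by_cases h1 : x = '\\'
  · subst h1; decide
  by_cases h2 : x = '\n'
  · subst h2; decide
  by_cases h3 : x = ','
  · subst h3; decide
  by_cases h4 : x = ';'
  · subst h4; decide
  simp [pvG, h1, h2, h3, h4]

theorem pvSanA_flat (s : List Char) : pvSanA s = s.flatMap pvG := by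
  by_cases hs : s = []
  · subst hs; simp [pvSanA]
  · rw [pvSanA, if_neg hs]
    rw [pvReplace_single, pvReplace_single, pvReplace_single, pvReplace_single]
    rw [List.flatMap_assoc, List.flatMap_assoc, List.flatMap_assoc]
    exact List.flatMap_congr (fun x _ => pvChain x)

-- B's dict lookup computes pvG
theorem pvG_eq (c : Char) : (PySem.Dict.getD pvMappingB c (String.ofList [c])).toList = pvG c := by
  by_cases h1 : c = '\\'
  · subst h1; decide
  by_cases h2 : c = '\n'
  · subst h2; decide
  by_cases h3 : c = ','
  · subst h3; decide
  by_cases h4 : c = ';'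
  · subst h4; decide
  have e1 : ('\\' == c) = false := by simp [beq_eq_false_iff_ne]; exact Ne.symm h1
  have e2 : ('\n' == c) = false := by simp [beq_eq_false_iff_ne]; exact Ne.symm h2
  have e3 : (',' == c) = false := by simp [beq_eq_false_iff_ne]; exact Ne.symm h3
  have e4 : (';' == c) = false := by simp [beq_eq_false_iff_ne]; exact Ne.symm h4
  simp [pvMappingB, pvG, h1, h2, h3, h4, e1, e2, e3, e4, PySem.Dict.getD, PySem.Dict.ofList,
    PySem.Dict.update, PySem.Dict.get?, PySem.Dict.empty, PySem.Dict.insert]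

-- the two escape passes agree
theorem pvEsc_eq (s : List Char) :
    pvSanA s = PySem.Chars.join [] (s.map (fun c => (PySem.Dict.getD pvMappingB c (String.ofList [c])).toList)) := by
  have hmap : s.map (fun c => (PySem.Dict.getD pvMappingB c (String.ofList [c])).toList) = s.map pvG :=
    List.map_congr_left (fun c _ => pvG_eq c)
  rw [hmap, pvJoin_empty, pvSanA_flat]
  simp [List.flatMap_def]

theorem pvG_length (c : Char) :
    (pvG c).length = 1 + (if (c == '\\' || c == '\n' || c == ',' || c == ';') = true then 1 else 0) := by
  by_cases h1 : c = '\\'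
  · subst h1; decide
  by_cases h2 : c = '\n'
  · subst h2; decide
  by_cases h3 : c = ','
  · subst h3; decide
  by_cases h4 : c = ';'
  · subst h4; decide
  simp [pvG, h1, h2, h3, h4]

-- length of the escaped text, used to read Pre_'s second disjunct
theorem pvSanA_length (s : List Char) :
    (pvSanA s).length = s.length + s.countP (fun c => c == '\\' || c == '\n' || c == ',' || c == ';') := by
  rw [pvSanA_flat]
  induction s with
  | nil => simp
  | cons c t ih =>
    rw [List.flatMap_cons, List.length_append, ih, List.countP_cons, pvG_length]
    simp only [List.length_cons]
    split_ifs <;> omega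

theorem pvRange_pos_cons (a b s : Int) (hs : 0 < s) (hab : a < b) :
    PySem.List.pyRange a b s = a :: PySem.List.pyRange (a + s) b s := by
  rw [PySem.List.pyRange_of_pos a b hs, PySem.List.pyRange_of_pos (a + s) b hs, if_pos hab]
  have hd : (b - a + s - 1) / s = (b - (a + s) + s - 1) / s + 1 := by
    have : b - a + s - 1 = (b - (a + s) + s - 1) + 1 * s := by ring
    rw [this, Int.add_mul_ediv_right _ _ (by omega)]
  have key : (b - a + s - 1) / s = ((if a + s < b then ((b - (a + s) + s - 1) / s).toNat else 0) : Int) + 1 := by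
    by_cases h2 : a + s < b
    · rw [if_pos h2, hd]
      have h0 : 0 ≤ (b - (a + s) + s - 1) / s := Int.ediv_nonneg (by omega) (by omega)
      omega
    · rw [if_neg h2, hd]
      have h0 : (b - (a + s) + s - 1) / s = 0 := by
        apply Int.ediv_eq_zero_of_lt <;> omega
      omega
  have keyN : ((b - a + s - 1) / s).toNat = (if a + s < b then ((b - (a + s) + s - 1) / s).toNat else 0) + 1 := by
    split_ifs at key ⊢ <;> omega
  rw [keyN, List.range_succ_eq_map, List.map_cons, List.map_map]
  congr 1
  · simp
  · apply List.map_congr_left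
    intro k _
    simp only [Function.comp_apply]
    push_cast
    ring

theorem pvRange_pos_nil (a b s : Int) (hs : 0 < s) (hab : ¬ a < b) :
    PySem.List.pyRange a b s = [] := by
  rw [PySem.List.pyRange_of_pos a b hs, if_neg hab]; simp

-- A's consume-the-remainder loop produces exactly B's chunk at each fold start position
theorem pvLoop_eq (full : List Char) (ll : Int) (h2 : 2 ≤ ll) :
    ∀ (fuel : Nat) (j : Nat) (acc : List (List Char)), full.length - j ≤ fuel →
      pvLoopA ll fuel (full.drop j) acc =
        acc ++ (PySem.List.pyRange (j : Int) (full.length : Int) (ll - 1)).map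
          (fun i => ' ' :: PySem.List.slice full (some i) (some (i + (ll - 1)))) := by
  intro fuel
  induction fuel with
  | zero =>
    intro j acc h
    rw [pvLoopA, pvRange_pos_nil _ _ _ (by omega) (by omega)]
    simp
  | succ n ih =>
    intro j acc h
    rw [pvLoopA]
    by_cases hr : full.drop j = []
    · rw [if_pos hr]
      have hj : full.length ≤ j := by
        have := List.drop_eq_nil_iff.mp hr
        omega
      rw [pvRange_pos_nil _ _ _ (by omega) (by omega)]
      simp
    · rw [if_neg hr]
      have hj : j < full.length := by
        by_contra hc
        exact hr (List.drop_eq_nil_iff.mpr (by omega))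
      have hcast : ((j : Int) + (ll - 1)) = ((j + (ll - 1).toNat : Nat) : Int) := by push_cast; omega
      have hs1 : PySem.List.slice (full.drop j) none (some (ll - 1)) = (full.drop j).take (ll - 1).toNat :=
        PySem.List.slice_to _ (by omega)
      have hs2 : PySem.List.slice (full.drop j) (some (ll - 1)) none = full.drop (j + (ll - 1).toNat) := by
        rw [PySem.List.slice_from _ (by omega), List.drop_drop, Nat.add_comm]
      have hs3 : PySem.List.slice full (some (j : Int)) (some ((j : Int) + (ll - 1))) = (full.drop j).take (ll - 1).toNat := by
        rw [PySem.List.slice_toNat _ (by omega) (by omega)]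
        congr 1
        omega
      rw [hs1, hs2]
      rw [ih (j + (ll - 1).toNat) _ (by omega)]
      conv_rhs => rw [pvRange_pos_cons (j : Int) (full.length : Int) (ll - 1) (by omega) (by exact_mod_cast hj), List.map_cons]
      rw [hs3, hcast]
      simp

-- ===== VERDICT (by name: the statement is the Claim_ definition above) =====
theorem escape_and_fold_ical_text_spec : Claim_equal_escape_and_fold_ical_text := by
  intro text prefix_ ll _ hPre
  unfold Spec_escape_and_fold_ical_text
  unfold escape_and_fold_ical_text escape_and_fold_ical_text_alt
  rw [← pvEsc_eq]
  dsimp only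
  set full := prefix_.toList ++ pvSanA text.toList with hfull
  by_cases hle : (full.length : Int) ≤ ll
  · rw [if_pos hle, if_pos hle]
  · rw [if_neg hle, if_neg hle]
    have h2 : 2 ≤ ll := by
      rcases hPre with h | h
      · exact h
      · exfalso
        apply hle
        rw [hfull, List.length_append, pvSanA_length]
        push_cast
        omega
    have hrem : PySem.List.slice full (some ll) none = full.drop ll.toNat :=
      PySem.List.slice_from _ (by omega)
    rw [hrem]
    rw [pvLoop_eq full ll h2 (full.drop ll.toNat).length ll.toNat _ (by simp)]
    rw [Int.toNat_of_nonneg (by omega : (0:Int) ≤ ll)]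
    simp
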